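-- pv_equiv track=rewrite | github.com/sdfim/leetcode-solutions | backtracking/ADVANCED/maximum_score_words_formed_by_letters.py | maxScoreWords
-- ===== SOURCE A (Python) =====
-- from typing import List
-- from collections import Counter
--
-- def maxScoreWords(words: List[str], letters: List[str], score: List[int]) -> int:
--     def backtrack(index, current_score):
--         if index == len(words):
--             return current_score
--
--         max_score = backtrack(index + 1, current_score)
--         word_count = Counter(words[index])
--         if all(word_count[char] <= letter_count[char] for char in word_count):
--             for char in word_count:
--                 letter_count[char] -= word_count[char]
--             max_score = max(max_score, backtrack(index + 1, current_score + sum(score[ord(char) - ord('a')] * word_count[char] for char in word_count)))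
--             for char in word_count:
--                 letter_count[char] += word_count[char]
--
--         return max_score
--
--     letter_count = Counter(letters)
--     return backtrack(0, 0)
-- ===== SOURCE B (Python) =====
-- from typing import List
-- from collections import Counter
--
-- def maxScoreWords(words: List[str], letters: List[str], score: List[int]) -> int:
--     budget = Counter(letters)
--     n = len(words)
--     best = 0
--     for mask in range(1 << n):
--         used = Counter()
--         for i in range(n):
--             if (mask >> i) & 1:
--                 used.update(words[i])
--         if all(used[ch] <= budget[ch] for ch in used):
--             total = sum(score[ord(c) - ord('a')] for i in range(n) if (mask >> i) & 1 for c in words[i])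
--             best = max(best, total)
--     return best
-- ===== Notes on version B (the rewrite author's own statement) =====
-- stated objective: alternative
-- what changed: Replaces A's mutate-and-restore backtracking recursion by a flat bitmask loop over all 2^n subsets, each subset's letter usage and score rebuilt independently and checked against the full letter budget, with a running maximum.
import Mathlib
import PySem

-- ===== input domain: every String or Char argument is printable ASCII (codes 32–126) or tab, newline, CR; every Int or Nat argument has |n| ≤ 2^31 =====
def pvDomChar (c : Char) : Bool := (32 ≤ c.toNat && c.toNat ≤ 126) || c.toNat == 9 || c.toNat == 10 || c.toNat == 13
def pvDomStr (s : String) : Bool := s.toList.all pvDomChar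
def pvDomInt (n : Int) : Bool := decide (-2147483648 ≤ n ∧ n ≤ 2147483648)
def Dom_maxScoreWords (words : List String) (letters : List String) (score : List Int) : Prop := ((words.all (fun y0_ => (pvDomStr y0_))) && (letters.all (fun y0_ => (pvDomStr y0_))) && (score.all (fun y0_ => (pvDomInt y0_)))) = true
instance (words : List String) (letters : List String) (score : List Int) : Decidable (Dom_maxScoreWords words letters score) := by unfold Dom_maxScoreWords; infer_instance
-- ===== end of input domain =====

-- B replaces A's mutate-and-restore backtracking recursion by a flat bitmask enumeration of all
-- subsets, each evaluated independently against the full budget (objective: alternative, same cost).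

-- shared character-level helpers (Python str iteration yields 1-char strings; Counter keys are strings)
def pvChars (w : String) : List String := w.toList.map (fun c => String.mk [c])
def pvOrd (s : String) : Int := match s.toList with | [] => 0 | c :: _ => (c.toNat : Int)
-- score[ord(ch) - ord('a')]: Python indexing, negative index from the end; the .getD 0 default is
-- only reached where the Python raises IndexError, which Pre_maxScoreWords excludes.
def pvLookup (score : List Int) (ch : String) : Int := (PySem.List.pyGet? score (pvOrd ch - 97)).getD 0

-- ===== PORT A =====
def pvFits (wc lc : PySem.Dict String Int) : Bool :=
  wc.keys.all (fun ch => decide (wc.getD ch 0 ≤ lc.getD ch 0))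
def pvSubtract (lc wc : PySem.Dict String Int) : PySem.Dict String Int :=
  wc.keys.foldl (fun d ch => d.modify ch 0 (fun v => v - wc.getD ch 0)) lc
def pvWordScore (score : List Int) (wc : PySem.Dict String Int) : Int :=
  (wc.keys.map (fun ch => pvLookup score ch * wc.getD ch 0)).sum
-- backtrack(index, current_score): structural recursion over the remaining suffix of words.
-- Python mutates letter_count and restores it after the recursive call; the pure port passes the
-- subtracted dict only into that call, which is the same behaviour.
def pvBacktrack (score : List Int) (lc : PySem.Dict String Int) : List String → Int → Int
  | [], cur => cur
  | w :: rest, cur =>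
    let m := pvBacktrack score lc rest cur
    let wc := PySem.Dict.counter (pvChars w)
    if pvFits wc lc then
      max m (pvBacktrack score (pvSubtract lc wc) rest (cur + pvWordScore score wc))
    else m

def maxScoreWords (words : List String) (letters : List String) (score : List Int) : Int :=
  pvBacktrack score (PySem.Dict.counter letters) words 0

-- ===== PORT B =====
def pvBit (mask i : Nat) : Bool := (mask >>> i) &&& 1 == 1

def maxScoreWords_alt (words : List String) (letters : List String) (score : List Int) : Int :=
  let budget : PySem.Dict String Int := PySem.Dict.counter letters
  let n := words.length
  (List.range (2 ^ n)).foldl (fun best mask =>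
    let used := (List.range n).foldl (fun d i =>
        if pvBit mask i then
          (pvChars (words.getD i "")).foldl (fun d ch => d.modify ch 0 (· + 1)) d
        else d) PySem.Dict.empty
    if used.keys.all (fun ch => decide (used.getD ch 0 ≤ budget.getD ch 0)) then
      let total := (List.range n).foldl (fun t i =>
          if pvBit mask i then t + ((pvChars (words.getD i "")).map (pvLookup score)).sum else t) 0
      max best total
    else best) 0

-- ===== PRECONDITION & SPEC =====
-- Pre_ excludes exactly the inputs where Python A raises IndexError: some word that fits the full
-- letter budget contains a character whose score index ord(c)-97 is out of range of score.
def Pre_maxScoreWords (words : List String) (letters : List String) (score : List Int) : Prop :=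
  (words.all (fun w =>
    !(w.toList.all (fun c => decide (w.toList.count c ≤ letters.count (String.mk [c])))) ||
    w.toList.all (fun c => decide (PySem.Raise.InRange score.length ((c.toNat : Int) - 97))))) = true
instance (words : List String) (letters : List String) (score : List Int) : Decidable (Pre_maxScoreWords words letters score) := by unfold Pre_maxScoreWords; infer_instance
def pvWitness_maxScoreWords : List String × List String × List Int := (["ab", "c"], ["a", "b"], [1, 2, 3])

def Spec_maxScoreWords (words : List String) (letters : List String) (score : List Int) (out : Int) : Prop := out = maxScoreWords_alt words letters score
instance (words : List String) (letters : List String) (score : List Int) (out : Int) : Decidable (Spec_maxScoreWords words letters score out) := by unfold Spec_maxScoreWords; infer_instance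

-- ===== CLAIM (what is proved, stated in full; the proofs are below) =====
def Claim_equal_maxScoreWords : Prop := ∀ (words : List String) (letters : List String) (score : List Int), Dom_maxScoreWords words letters score → Pre_maxScoreWords words letters score → Spec_maxScoreWords words letters score (maxScoreWords words letters score)

-- ===== LEMMAS AND PROOFS =====

-- abstractions: multiplicity of a character-string in a word, value / feasibility of a subset
def pvCW (w : String) (ch : String) : Int := ((pvChars w).count ch : Int)
def pvVal (score : List Int) (S : List String) : Int := ((S.flatMap pvChars).map (pvLookup score)).sum
def pvFeas (g : String → Int) (S : List String) : Prop :=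
  ∀ ch ∈ S.flatMap pvChars, ((S.flatMap pvChars).count ch : Int) ≤ g ch
def pvFeasB (g : String → Int) (S : List String) : Bool :=
  (S.flatMap pvChars).all (fun ch => decide (((S.flatMap pvChars).count ch : Int) ≤ g ch))

-- A's recursion with the budget abstracted to a function String → Int
def pvF (score : List Int) : List String → (String → Int) → Int
  | [], _ => 0
  | w :: rest, g =>
    let m := pvF score rest g
    if (pvChars w).all (fun ch => decide (pvCW w ch ≤ g ch)) then
      max m (((pvChars w).map (pvLookup score)).sum + pvF score rest (fun ch => g ch - pvCW w ch))
    else m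

-- B's per-mask selection of words
def pvSel (ws : List String) (mask : Nat) : List String :=
  ((List.range ws.length).filter (fun i => pvBit mask i)).map (fun i => ws.getD i "")

lemma pvFeasB_iff (g : String → Int) (S : List String) : pvFeasB g S = true ↔ pvFeas g S := by
  simp only [pvFeasB, pvFeas, List.all_eq_true, decide_eq_true_eq]


lemma getD_foldl_modify_sub (wc : PySem.Dict String Int) (x : String) :
    ∀ (ks : List String) (lc : PySem.Dict String Int), ks.Nodup →
    (ks.foldl (fun d ch => d.modify ch 0 (fun v => v - wc.getD ch 0)) lc).getD x 0
      = lc.getD x 0 - (if x ∈ ks then wc.getD x 0 else 0) := by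
  intro ks
  induction ks with
  | nil => intro lc _; simp
  | cons k ks ih =>
    intro lc hnd
    rw [List.foldl_cons, ih _ (List.nodup_cons.mp hnd).2, PySem.Dict.getD_modify]
    by_cases hxk : x = k
    · subst hxk
      have hx : x ∉ ks := (List.nodup_cons.mp hnd).1
      simp [hx]
    · simp [hxk, List.mem_cons]

lemma getD_pvSubtract (lc : PySem.Dict String Int) (w : String) (ch : String) :
    (pvSubtract lc (PySem.Dict.counter (pvChars w))).getD ch 0 = lc.getD ch 0 - pvCW w ch := by
  rw [pvSubtract, getD_foldl_modify_sub _ _ _ _ (PySem.Dict.nodup_keys_counter _)]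
  rw [PySem.Dict.keys_counter]
  by_cases hmem : ch ∈ pvChars w
  · simp [PySem.Set.mem_ofList, hmem, PySem.Dict.getD_counter, pvCW]
  · simp [PySem.Set.mem_ofList, hmem, pvCW, List.count_eq_zero_of_not_mem hmem]

lemma pvFits_iff (w : String) (lc : PySem.Dict String Int) :
    pvFits (PySem.Dict.counter (pvChars w)) lc = true ↔ ∀ ch ∈ pvChars w, pvCW w ch ≤ lc.getD ch 0 := by
  simp [pvFits, List.all_eq_true, PySem.Dict.keys_counter, PySem.Dict.getD_counter, pvCW,
    PySem.Set.mem_ofList]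

lemma sum_dedup_mul (xs : List String) (lk : String → Int) :
    ((PySem.Set.ofList xs).map (fun ch => lk ch * (xs.count ch : Int))).sum = (xs.map lk).sum := by
  have hnd : (PySem.Set.ofList xs).Nodup := PySem.Set.nodup_ofList xs
  have htf : (PySem.Set.ofList xs).toFinset = xs.toFinset := by
    ext a; simp [List.mem_toFinset, PySem.Set.mem_ofList]
  rw [← List.sum_toFinset _ hnd, htf, Finset.sum_list_map_count]
  apply Finset.sum_congr rfl
  intro x _
  rw [nsmul_eq_mul]
  ring

lemma pvWordScore_counter (score : List Int) (w : String) :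
    pvWordScore score (PySem.Dict.counter (pvChars w)) = ((pvChars w).map (pvLookup score)).sum := by
  rw [pvWordScore, PySem.Dict.keys_counter]
  simp only [PySem.Dict.getD_counter]
  exact sum_dedup_mul (pvChars w) (pvLookup score)

lemma pvBacktrack_eq (score : List Int) :
    ∀ (rest : List String) (lc : PySem.Dict String Int) (cur : Int),
    pvBacktrack score lc rest cur = cur + pvF score rest (fun ch => lc.getD ch 0) := by
  intro rest
  induction rest with
  | nil => intro lc cur; simp [pvBacktrack, pvF]
  | cons w rest ih =>
    intro lc cur
    have hg : (fun ch => (pvSubtract lc (PySem.Dict.counter (pvChars w))).getD ch 0)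
        = (fun ch => lc.getD ch 0 - pvCW w ch) := funext (getD_pvSubtract lc w)
    have hcond : pvFits (PySem.Dict.counter (pvChars w)) lc
        = (pvChars w).all (fun ch => decide (pvCW w ch ≤ lc.getD ch 0)) := by
      rw [Bool.eq_iff_iff, pvFits_iff]
      simp [List.all_eq_true]
    simp only [pvBacktrack, pvF, ih, hg, hcond, pvWordScore_counter]
    split
    · rw [← max_add_add_left, add_assoc]
    · rfl

lemma pvVal_cons (score : List Int) (w : String) (S : List String) :
    pvVal score (w :: S) = ((pvChars w).map (pvLookup score)).sum + pvVal score S := by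
  simp [pvVal, List.flatMap_cons]

lemma pvFeas_cons (g : String → Int) (w : String) (S : List String) :
    pvFeas g (w :: S) ↔
      ((∀ ch ∈ pvChars w, pvCW w ch ≤ g ch) ∧ pvFeas (fun ch => g ch - pvCW w ch) S) := by
  simp only [pvFeas, pvCW, List.flatMap_cons, List.count_append, List.mem_append]
  constructor
  · intro h
    refine ⟨?_, ?_⟩
    · intro ch hch
      have := h ch (Or.inl hch)
      push_cast at this
      omega
    · intro ch hch
      have := h ch (Or.inr hch)
      push_cast at this ⊢
      omega
  · rintro ⟨h1, h2⟩ ch hch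
    rcases hch with hw | hs
    · have hcw := h1 ch hw
      by_cases hs' : ch ∈ S.flatMap pvChars
      · have := h2 ch hs'
        push_cast at hcw this ⊢
        omega
      · rw [List.count_eq_zero_of_not_mem hs']
        push_cast at hcw ⊢
        omega
    · have hcs := h2 ch hs
      by_cases hw' : ch ∈ pvChars w
      · have hcw := h1 ch hw'
        push_cast at hcw hcs ⊢
        omega
      · rw [List.count_eq_zero_of_not_mem hw']
        push_cast at hcs ⊢
        omega

lemma pvF_ge (score : List Int) :
    ∀ (ws : List String) (g : String → Int) (S : List String),
      S.Sublist ws → pvFeas g S → pvVal score S ≤ pvF score ws g := by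
  intro ws
  induction ws with
  | nil =>
    intro g S hS _
    rw [List.sublist_nil] at hS
    subst hS
    simp [pvVal, pvF]
  | cons w ws ih =>
    intro g S hS hf
    simp only [pvF]
    cases hS with
    | cons _ hS' =>
      have hle := ih g S hS' hf
      split
      · exact le_trans hle (le_max_left _ _)
      · exact hle
    | cons₂ _ hS' =>
      obtain ⟨hw, hrest⟩ := (pvFeas_cons g w _).mp hf
      have hcond : ((pvChars w).all (fun ch => decide (pvCW w ch ≤ g ch))) = true := by
        simp [List.all_eq_true]
        exact hw
      rw [if_pos hcond, pvVal_cons]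
      have := ih (fun ch => g ch - pvCW w ch) _ hS' hrest
      refine le_trans ?_ (le_max_right _ _)
      omega

lemma pvF_attained (score : List Int) :
    ∀ (ws : List String) (g : String → Int),
      ∃ S : List String, S.Sublist ws ∧ pvFeas g S ∧ pvF score ws g = pvVal score S := by
  intro ws
  induction ws with
  | nil =>
    intro g
    refine ⟨[], List.Sublist.refl [], ?_, by simp [pvF, pvVal]⟩
    intro ch hch
    simp at hch
  | cons w ws ih =>
    intro g
    simp only [pvF]
    by_cases hc : ((pvChars w).all (fun ch => decide (pvCW w ch ≤ g ch))) = true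
    · rw [if_pos hc]
      obtain ⟨S', hS', hf', hv'⟩ := ih (fun ch => g ch - pvCW w ch)
      obtain ⟨S0, hS0, hf0, hv0⟩ := ih g
      rcases le_total (((pvChars w).map (pvLookup score)).sum + pvF score ws fun ch => g ch - pvCW w ch)
          (pvF score ws g) with h | h
      · exact ⟨S0, List.Sublist.cons w hS0, hf0, by rw [max_eq_left h, hv0]⟩
      · refine ⟨w :: S', List.Sublist.cons₂ w hS', ?_, ?_⟩
        · refine (pvFeas_cons g w S').mpr ⟨?_, hf'⟩
          simpa [List.all_eq_true] using hc
        · rw [max_eq_right h, pvVal_cons, hv']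
    · rw [if_neg hc]
      obtain ⟨S0, hS0, hf0, hv0⟩ := ih g
      exact ⟨S0, List.Sublist.cons w hS0, hf0, hv0⟩

lemma pvF_nonneg (score : List Int) (ws : List String) (g : String → Int) : 0 ≤ pvF score ws g := by
  have h := pvF_ge score ws g [] (List.nil_sublist ws) (by intro ch hch; simp at hch)
  simpa [pvVal] using h

lemma pvBit_succ (mask i : Nat) : pvBit mask (i + 1) = pvBit (mask / 2) i := by
  unfold pvBit
  rw [show i + 1 = 1 + i from Nat.add_comm i 1, Nat.shiftRight_add, Nat.shiftRight_one]

lemma pvBit_double (m : Nat) : pvBit (2 * m) 0 = false := by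
  unfold pvBit
  simp [Nat.shiftRight_zero, Nat.and_one_is_mod, Nat.mul_mod_right]

lemma pvBit_double_succ (m : Nat) : pvBit (2 * m + 1) 0 = true := by
  unfold pvBit
  simp [Nat.shiftRight_zero, Nat.and_one_is_mod]

lemma pvSel_cons (w : String) (ws : List String) (mask : Nat) :
    pvSel (w :: ws) mask = (if pvBit mask 0 then [w] else []) ++ pvSel ws (mask / 2) := by
  unfold pvSel
  have hp : ((fun i => pvBit mask i) ∘ Nat.succ) = (fun i => pvBit (mask / 2) i) :=
    funext fun i => pvBit_succ mask i
  have hf : ((fun i => (w :: ws).getD i "") ∘ Nat.succ) = (fun i => ws.getD i "") :=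
    funext fun i => List.getD_cons_succ
  rw [List.length_cons, List.range_succ_eq_map, List.filter_cons]
  by_cases h0 : pvBit mask 0
  · simp only [h0, if_pos, List.map_cons, List.getD_cons_zero, List.filter_map, List.map_map,
      hp, hf, List.singleton_append]
  · simp only [h0, Bool.false_eq_true, if_neg, List.filter_map, List.map_map, hp, hf,
      List.nil_append, Bool.false_eq_true, not_false_iff]

lemma pvSel_sublist : ∀ (ws : List String) (mask : Nat), (pvSel ws mask).Sublist ws := by
  intro ws
  induction ws with
  | nil => intro mask; simp [pvSel]
  | cons w ws ih =>
    intro mask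
    rw [pvSel_cons]
    by_cases h : pvBit mask 0
    · simpa [h] using List.Sublist.cons₂ w (ih (mask / 2))
    · simpa [h] using List.Sublist.cons w (ih (mask / 2))

lemma pvSel_surj : ∀ {S ws : List String}, S.Sublist ws →
    ∃ m : Nat, m < 2 ^ ws.length ∧ pvSel ws m = S := by
  intro S ws h
  induction h with
  | slnil => exact ⟨0, by norm_num, by simp [pvSel]⟩
  | @cons l₁ l₂ a h ih =>
    obtain ⟨m, hm, hsel⟩ := ih
    refine ⟨2 * m, ?_, ?_⟩
    · rw [List.length_cons, pow_succ]; omega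
    · rw [pvSel_cons, pvBit_double]
      simp only [Bool.false_eq_true, if_neg, List.nil_append, not_false_iff]
      rw [show 2 * m / 2 = m by omega]
      exact hsel
  | @cons₂ l₁ l₂ a h ih =>
    obtain ⟨m, hm, hsel⟩ := ih
    refine ⟨2 * m + 1, ?_, ?_⟩
    · rw [List.length_cons, pow_succ]; omega
    · rw [pvSel_cons, pvBit_double_succ]
      simp only [if_pos, List.singleton_append]
      rw [show (2 * m + 1) / 2 = m by omega]
      rw [hsel]

lemma bestFold_ge_init (p : Nat → Bool) (f : Nat → Int) :
    ∀ (l : List Nat) (a : Int), a ≤ l.foldl (fun best m => if p m then max best (f m) else best) a := by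
  intro l
  induction l with
  | nil => intro a; simp
  | cons x l ih =>
    intro a
    rw [List.foldl_cons]
    refine le_trans ?_ (ih _)
    split
    · exact le_max_left _ _
    · exact le_refl a

lemma bestFold_ge_mem (p : Nat → Bool) (f : Nat → Int) :
    ∀ (l : List Nat) (a : Int) (m : Nat), m ∈ l → p m = true →
      f m ≤ l.foldl (fun best m => if p m then max best (f m) else best) a := by
  intro l
  induction l with
  | nil => intro a m hm; simp at hm
  | cons x l ih =>
    intro a m hm hp
    rw [List.foldl_cons]
    rcases List.mem_cons.mp hm with rfl | hm'
    · refine le_trans ?_ (bestFold_ge_init p f l _)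
      rw [if_pos hp]
      exact le_max_right _ _
    · exact ih _ m hm' hp

lemma bestFold_cases (p : Nat → Bool) (f : Nat → Int) :
    ∀ (l : List Nat) (a : Int),
      l.foldl (fun best m => if p m then max best (f m) else best) a = a ∨
      ∃ m ∈ l, p m = true ∧ l.foldl (fun best m => if p m then max best (f m) else best) a = f m := by
  intro l
  induction l with
  | nil => intro a; left; simp
  | cons x l ih =>
    intro a
    rw [List.foldl_cons]
    rcases ih (if p x then max a (f x) else a) with h | ⟨m, hm, hp, hv⟩
    · rw [h]
      by_cases hpx : p x = true
      · rw [if_pos hpx]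
        rcases max_choice a (f x) with h' | h'
        · left; exact h'
        · right; exact ⟨x, List.mem_cons_self, hpx, h'⟩
      · left; rw [if_neg hpx]
    · right; exact ⟨m, List.mem_cons_of_mem _ hm, hp, hv⟩

lemma foldl_flatMap' {α β γ : Type} (l : List α) (g : α → List β) (f : γ → β → γ) :
    ∀ init : γ, (l.flatMap g).foldl f init = l.foldl (fun a x => (g x).foldl f a) init := by
  induction l with
  | nil => intro init; simp
  | cons x l ih => intro init; simp [List.flatMap_cons, List.foldl_append, ih]

lemma sum_map_flatMap {α β : Type} (l : List α) (g : α → List β) (f : β → Int) :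
    ((l.flatMap g).map f).sum = (l.map (fun x => ((g x).map f).sum)).sum := by
  induction l with
  | nil => simp
  | cons x l ih => simp [List.flatMap_cons, ih]

lemma used_eq (words : List String) (mask : Nat) :
    ((List.range words.length).foldl (fun d i =>
        if pvBit mask i then
          (pvChars (words.getD i "")).foldl (fun d ch => d.modify ch 0 (· + 1)) d
        else d) (PySem.Dict.empty : PySem.Dict String Int))
      = PySem.Dict.counter ((pvSel words mask).flatMap pvChars) := by
  rw [PySem.List.foldl_if_eq_foldl_filter, PySem.Dict.counter_eq_foldl]
  unfold pvSel
  rw [foldl_flatMap', List.foldl_map]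

lemma total_eq (words : List String) (score : List Int) (mask : Nat) :
    ((List.range words.length).foldl (fun t i =>
        if pvBit mask i then t + ((pvChars (words.getD i "")).map (pvLookup score)).sum else t) 0)
      = pvVal score (pvSel words mask) := by
  rw [PySem.List.foldl_if_eq_foldl_filter, PySem.List.foldl_add]
  unfold pvVal pvSel
  rw [sum_map_flatMap, List.map_map]
  simp [Function.comp_def]

lemma cond_eq (letters : List String) (S : List String) :
    ((PySem.Dict.counter (S.flatMap pvChars) : PySem.Dict String Int).keys.all (fun ch =>
        decide ((PySem.Dict.counter (S.flatMap pvChars)).getD ch 0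
          ≤ (PySem.Dict.counter letters : PySem.Dict String Int).getD ch 0)))
      = pvFeasB (fun ch => (letters.count ch : Int)) S := by
  rw [Bool.eq_iff_iff]
  simp [List.all_eq_true, PySem.Dict.keys_counter, PySem.Dict.getD_counter, pvFeasB,
    PySem.Set.mem_ofList]
  tauto

lemma alt_eq (words letters : List String) (score : List Int) :
    maxScoreWords_alt words letters score =
      (List.range (2 ^ words.length)).foldl (fun best mask =>
        if pvFeasB (fun ch => (letters.count ch : Int)) (pvSel words mask) then
          max best (pvVal score (pvSel words mask))
        else best) 0 := by
  unfold maxScoreWords_alt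
  dsimp only
  apply PySem.List.foldl_congr_mem
  intro best mask _
  rw [used_eq, cond_eq, total_eq]

-- ===== VERDICT (by name: the statement is the Claim_ definition above) =====
theorem maxScoreWords_spec : Claim_equal_maxScoreWords := by
  intro words letters score _ _
  unfold Spec_maxScoreWords maxScoreWords
  have hA : pvBacktrack score (PySem.Dict.counter letters) words 0
      = pvF score words (fun ch => (letters.count ch : Int)) := by
    rw [pvBacktrack_eq, zero_add]
    congr 1
    funext ch
    rw [PySem.Dict.getD_counter]
  rw [hA, alt_eq]
  apply le_antisymm
  · obtain ⟨S, hS, hf, hv⟩ := pvF_attained score words (fun ch => (letters.count ch : Int))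
    obtain ⟨m, hm, hsel⟩ := pvSel_surj hS
    rw [hv, ← hsel]
    refine bestFold_ge_mem _ _ _ _ m (List.mem_range.mpr hm) ?_
    rw [hsel]
    exact (pvFeasB_iff _ _).mpr (hsel ▸ hf)
  · rcases bestFold_cases (fun m => pvFeasB (fun ch => (letters.count ch : Int)) (pvSel words m))
        (fun m => pvVal score (pvSel words m)) (List.range (2 ^ words.length)) 0 with h | ⟨m, _, hp, hv⟩
    · rw [h]; exact pvF_nonneg _ _ _
    · rw [hv]
      exact pvF_ge score words _ (pvSel words m) (pvSel_sublist words m) ((pvFeasB_iff _ _).mp hp)
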